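-- pv_equiv track=rewrite | github.com/bluek1te/algos | hotel_stops.py | solution
-- ===== SOURCE A (Python) =====
-- from typing import List
--
-- def solution(a: List[int]) -> int:
--     n = len(a)
--     p = [0] * n
--     p[0] = 0
--     for i in range(1,n):
--         p[i] = (200 - a[i])**2
--         for j in range(1,i):
--             if p[i] > p[j] + (200 - (a[i]-a[j]))**2:
--                 p[i] = p[j] + (200 - (a[i]-a[j]))**2
--     return p[n-1]
-- ===== SOURCE B (Python) =====
-- from typing import List
--
-- # Li Chao tree (exact min of lines at integer points) over the position range.
-- _LO = -(2**31)
-- _HI = 2**31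
--
--
-- def _insert(lo, hi, g, t):
--     if t is None:
--         return (g, None, None)
--     f, lt, rt = t
--     mid = (lo + hi) // 2
--     if g[0] * mid + g[1] < f[0] * mid + f[1]:
--         f, g = g, f
--     if lo == hi:
--         return (f, lt, rt)
--     if g[0] * lo + g[1] < f[0] * lo + f[1]:
--         return (f, _insert(lo, mid, g, lt), rt)
--     return (f, lt, _insert(mid + 1, hi, g, rt))
--
--
-- def _query(lo, hi, x, t):
--     if t is None:
--         return None
--     f, lt, rt = t
--     mid = (lo + hi) // 2
--     if x <= mid:
--         r = _query(lo, mid, x, lt)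
--     else:
--         r = _query(mid + 1, hi, x, rt)
--     v = f[0] * x + f[1]
--     return v if r is None else min(v, r)
--
--
-- def solution(a: List[int]) -> int:
--     # cost from stop j to i: p[j] + (200 - (a[i]-a[j]))**2
--     #   = p[j] + (a[j]+200)**2 - 2*(a[j]+200)*a[i] + a[i]**2
--     # so keep lines (slope, intercept) = (-2*(a[j]+200), p[j]+(a[j]+200)**2).
--     t = _insert(_LO, _HI, (-400, 40000), None)  # virtual start: position 0, cost 0
--     p_last = 0
--     for i in range(1, len(a)):
--         x = a[i]
--         p_i = _query(_LO, _HI, x, t) + x * x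
--         t = _insert(_LO, _HI, (-2 * (x + 200), p_i + (x + 200) ** 2), t)
--         p_last = p_i
--     return p_last
-- ===== Notes on version B (the rewrite author's own statement) =====
-- stated objective: faster
-- what changed: Replaces the quadratic all-pairs DP scan by a Li Chao tree of lines (slope -2*(a[j]+200), intercept p[j]+(a[j]+200)^2), so each p[i] is one O(log C) point query plus one line insertion instead of an O(i) inner loop.
import Mathlib
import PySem

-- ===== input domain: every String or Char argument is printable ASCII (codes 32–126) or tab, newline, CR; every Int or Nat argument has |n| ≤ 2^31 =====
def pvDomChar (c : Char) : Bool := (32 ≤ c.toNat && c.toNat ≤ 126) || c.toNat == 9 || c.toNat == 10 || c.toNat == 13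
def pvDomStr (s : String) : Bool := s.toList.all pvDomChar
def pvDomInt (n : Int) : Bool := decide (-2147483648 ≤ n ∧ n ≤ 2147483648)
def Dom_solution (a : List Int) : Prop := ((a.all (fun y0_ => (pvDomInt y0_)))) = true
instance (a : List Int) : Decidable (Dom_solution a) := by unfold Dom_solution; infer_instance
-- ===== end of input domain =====

-- B replaces A's O(n^2) all-pairs DP scan by a Li Chao tree of lines, one point query + one insertion per hotel.


-- ===== PORT A =====
-- Literal port of A. Under Pre_solution (a ≠ []) every index used is in range,
-- so pyGetD/pySetD are exact for Python's p[i]/p[i]=… .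
def solution (a : List Int) : Int :=
  let n : Int := a.length
  let p : List Int := List.replicate a.length 0
  let p := PySem.List.pySetD p 0 0
  let p := (PySem.List.pyRange 1 n 1).foldl (fun p i =>
    let p := PySem.List.pySetD p i ((200 - PySem.List.pyGetD a i 0) ^ 2)
    (PySem.List.pyRange 1 i 1).foldl (fun p j =>
      if PySem.List.pyGetD p i 0 >
          PySem.List.pyGetD p j 0 +
            (200 - (PySem.List.pyGetD a i 0 - PySem.List.pyGetD a j 0)) ^ 2 then
        PySem.List.pySetD p i
          (PySem.List.pyGetD p j 0 +
            (200 - (PySem.List.pyGetD a i 0 - PySem.List.pyGetD a j 0)) ^ 2)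
      else p) p) p
  PySem.List.pyGetD p (n - 1) 0

-- ===== PORT B =====
-- Li Chao tree over the coordinate range, mirroring Source B (None ↦ .empty, tuples ↦ node).
def pvLO : Int := -(2 ^ 31)
def pvHI : Int := 2 ^ 31

inductive LCT where
  | empty : LCT
  | node : Int × Int → LCT → LCT → LCT

def lctInsert (lo hi : Int) (g : Int × Int) : LCT → LCT
  | .empty => .node g .empty .empty
  | .node f lt rt =>
    let mid := PySem.Int.floordiv (lo + hi) 2
    let fg := if g.1 * mid + g.2 < f.1 * mid + f.2 then (g, f) else (f, g)
    if lo = hi then .node fg.1 lt rt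
    else if fg.2.1 * lo + fg.2.2 < fg.1.1 * lo + fg.1.2 then
      .node fg.1 (lctInsert lo mid fg.2 lt) rt
    else
      .node fg.1 lt (lctInsert (mid + 1) hi fg.2 rt)

def lctQuery (lo hi x : Int) : LCT → Option Int
  | .empty => none
  | .node f lt rt =>
    let mid := PySem.Int.floordiv (lo + hi) 2
    let r := if x ≤ mid then lctQuery lo mid x lt else lctQuery (mid + 1) hi x rt
    let v := f.1 * x + f.2
    some (match r with | none => v | some rv => min v rv)

-- `(lctQuery …).getD 0`: in Source B the query result is never None (the tree holds the start
-- line before the first query), so `_query(...) + x*x` is exact; the default is never used.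
def solution_alt (a : List Int) : Int :=
  let t0 := lctInsert pvLO pvHI (-400, 40000) .empty
  let st := (PySem.List.pyRange 1 (a.length : Int) 1).foldl (fun (st : LCT × Int) i =>
    let x := PySem.List.pyGetD a i 0
    let pi := (lctQuery pvLO pvHI x st.1).getD 0 + x * x
    (lctInsert pvLO pvHI (-2 * (x + 200), pi + (x + 200) ^ 2) st.1, pi)) (t0, (0 : Int))
  st.2

-- ===== PRECONDITION & SPEC =====
-- A raises IndexError on the empty list (p[0] = 0 with n = 0); Pre_ excludes exactly that.
def Pre_solution (a : List Int) : Prop := a ≠ []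
instance (a : List Int) : Decidable (Pre_solution a) := by unfold Pre_solution; infer_instance
def pvWitness_solution : List Int := [0, 150, 310]

def Spec_solution (a : List Int) (out : Int) : Prop := out = solution_alt a
instance (a : List Int) (out : Int) : Decidable (Spec_solution a out) := by unfold Spec_solution; infer_instance

-- ===== CLAIM (what is proved, stated in full; the proofs are below) =====
def Claim_equal_solution : Prop := ∀ (a : List Int), Dom_solution a → Pre_solution a → Spec_solution a (solution a)

-- ===== LEMMAS AND PROOFS =====

def qmin (r : Option Int) (v : Int) : Int := match r with | none => v | some w => min v w

lemma lctQuery_node (lo hi x : Int) (f : Int × Int) (lt rt : LCT) :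
    lctQuery lo hi x (.node f lt rt) =
      some (qmin (if x ≤ PySem.Int.floordiv (lo + hi) 2
                  then lctQuery lo (PySem.Int.floordiv (lo + hi) 2) x lt
                  else lctQuery (PySem.Int.floordiv (lo + hi) 2 + 1) hi x rt)
                 (f.1 * x + f.2)) := rfl

lemma dom_right (w l : Int × Int) (lo mid x : Int) (hmid : w.1*mid+w.2 ≤ l.1*mid+l.2)
    (hlo : l.1*lo+l.2 < w.1*lo+w.2) (hlm : lo ≤ mid) (hx : mid ≤ x) :
    w.1*x+w.2 ≤ l.1*x+l.2 := by
  have hs : 0 < (l.1 - w.1) * (mid - lo) := by nlinarith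
  have hs1 : 0 < l.1 - w.1 := by
    by_cases h : l.1 - w.1 ≤ 0
    · exact absurd hs (not_lt.mpr (mul_nonpos_of_nonpos_of_nonneg h (by omega)))
    · omega
  have h2 : 0 ≤ (l.1 - w.1) * (x - mid) := mul_nonneg (by omega) (by omega)
  nlinarith

lemma dom_left (w l : Int × Int) (lo mid x : Int) (hmid : w.1*mid+w.2 ≤ l.1*mid+l.2)
    (hlo : w.1*lo+w.2 ≤ l.1*lo+l.2) (hx1 : lo ≤ x) (hx2 : x ≤ mid) :
    w.1*x+w.2 ≤ l.1*x+l.2 := by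
  by_cases h : 0 ≤ l.1 - w.1
  · have h2 : 0 ≤ (l.1-w.1)*(x-lo) := mul_nonneg h (by omega)
    nlinarith
  · have h2 : 0 ≤ (w.1-l.1)*(mid-x) := mul_nonneg (by omega) (by omega)
    nlinarith

lemma qmin_dom (D : Option Int) (F G : Int) (h : G ≤ F) :
    qmin D G = qmin (some (qmin D F)) G := by cases D <;> simp [qmin] <;> omega

lemma qmin_dom2 (D : Option Int) (F G : Int) (h : F ≤ G) :
    qmin D F = qmin (some (qmin D F)) G := by cases D <;> simp [qmin] <;> omega

lemma qmin_swap (C : Option Int) (F G : Int) :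
    qmin (some (qmin C G)) F = qmin (some (qmin C F)) G := by cases C <;> simp [qmin] <;> omega

lemma lct_insert_query (t : LCT) : ∀ (lo hi x : Int) (g : Int × Int), lo ≤ x → x ≤ hi →
    lctQuery lo hi x (lctInsert lo hi g t) = some (qmin (lctQuery lo hi x t) (g.1 * x + g.2)) := by
  induction t with
  | empty =>
    intro lo hi x g h1 h2
    show lctQuery lo hi x (.node g .empty .empty) = _
    rw [lctQuery_node]
    have : ∀ c : Prop, ∀ [Decidable c],
        (if c then lctQuery lo (PySem.Int.floordiv (lo + hi) 2) x LCT.empty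
         else lctQuery (PySem.Int.floordiv (lo + hi) 2 + 1) hi x LCT.empty) = none := by
      intro c _; split <;> rfl
    rw [this]
    rfl
  | node f lt rt ihl ihr =>
    intro lo hi x g h1 h2
    have hmb := PySem.Int.floordiv_two_mid_bounds (le_trans h1 h2)
    set mid := PySem.Int.floordiv (lo + hi) 2 with hmiddef
    rw [lctQuery_node, ← hmiddef]
    by_cases hlohi : lo = hi
    · -- leaf range: mid = lo = hi = x
      have hmid : mid = lo := by
        rw [hmiddef, PySem.Int.floordiv_eq_iff_of_pos (by omega)]; omega
      have hx : x = lo := by omega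
      have hinseq : lctInsert lo hi g (.node f lt rt) =
          .node (if g.1 * mid + g.2 < f.1 * mid + f.2 then g else f) lt rt := by
        simp only [lctInsert, ← hmiddef, if_pos hlohi]
        by_cases hs : g.1 * mid + g.2 < f.1 * mid + f.2
        · rw [if_pos hs, if_pos hs]
        · rw [if_neg hs, if_neg hs]
      rw [hinseq, lctQuery_node, ← hmiddef]
      by_cases hs : g.1 * mid + g.2 < f.1 * mid + f.2
      · rw [if_pos hs]
        exact congrArg some (qmin_dom _ _ _ (by rw [hx, ← hmid]; omega))
      · rw [if_neg hs]
        exact congrArg some (qmin_dom2 _ _ _ (by rw [hx, ← hmid]; omega))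
    · have hlt : lo < hi := lt_of_le_of_ne (le_trans h1 h2) hlohi
      have hunf : lctInsert lo hi g (.node f lt rt) =
          (let fg := if g.1 * mid + g.2 < f.1 * mid + f.2 then (g, f) else (f, g)
           if fg.2.1 * lo + fg.2.2 < fg.1.1 * lo + fg.1.2 then
             LCT.node fg.1 (lctInsert lo mid fg.2 lt) rt
           else
             LCT.node fg.1 lt (lctInsert (mid + 1) hi fg.2 rt)) := by
        simp only [lctInsert, ← hmiddef, if_neg hlohi]
      rw [hunf]
      by_cases hs : g.1 * mid + g.2 < f.1 * mid + f.2
      · simp only [if_pos hs]   -- winner g, loser f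
        by_cases hleft : f.1 * lo + f.2 < g.1 * lo + g.2
        · simp only [if_pos hleft]
          rw [lctQuery_node, ← hmiddef]
          by_cases hx : x ≤ mid
          · rw [if_pos hx, if_pos hx, ihl lo mid x f h1 hx]
          · rw [if_neg hx, if_neg hx]
            have hdom : g.1*x+g.2 ≤ f.1*x+f.2 :=
              dom_right g f lo mid x (by omega) hleft hmb.1 (by omega)
            exact congrArg some (qmin_dom _ _ _ hdom)
        · simp only [if_neg hleft]
          rw [lctQuery_node, ← hmiddef]
          by_cases hx : x ≤ mid
          · rw [if_pos hx, if_pos hx]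
            have hdom : g.1*x+g.2 ≤ f.1*x+f.2 :=
              dom_left g f lo mid x (by omega) (by omega) h1 hx
            exact congrArg some (qmin_dom _ _ _ hdom)
          · rw [if_neg hx, if_neg hx, ihr (mid+1) hi x f (by omega) h2]
      · simp only [if_neg hs]   -- winner f, loser g
        by_cases hleft : g.1 * lo + g.2 < f.1 * lo + f.2
        · simp only [if_pos hleft]
          rw [lctQuery_node, ← hmiddef]
          by_cases hx : x ≤ mid
          · rw [if_pos hx, if_pos hx, ihl lo mid x g h1 hx]
            exact congrArg some (qmin_swap _ _ _)
          · rw [if_neg hx, if_neg hx]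
            have hdom : f.1*x+f.2 ≤ g.1*x+g.2 :=
              dom_right f g lo mid x (by omega) hleft hmb.1 (by omega)
            exact congrArg some (qmin_dom2 _ _ _ hdom)
        · simp only [if_neg hleft]
          rw [lctQuery_node, ← hmiddef]
          by_cases hx : x ≤ mid
          · rw [if_pos hx, if_pos hx]
            have hdom : f.1*x+f.2 ≤ g.1*x+g.2 :=
              dom_left f g lo mid x (by omega) (by omega) h1 hx
            exact congrArg some (qmin_dom2 _ _ _ hdom)
          · rw [if_neg hx, if_neg hx, ihr (mid+1) hi x g (by omega) h2]
            exact congrArg some (qmin_swap _ _ _)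

-- ===== DP side =====
def candMin (x : Int) (prev : List (Int × Int)) : Int :=
  prev.foldl (fun mv q => min mv (q.2 + (200 - (x - q.1)) ^ 2)) ((200 - x) ^ 2)

lemma pyGetD_nonneg_eq_getD (p : List Int) (j : Int) (d : Int) (hj : 0 ≤ j) :
    PySem.List.pyGetD p j d = p.getD j.toNat d := by
  have h : j = (j.toNat : Int) := by omega
  rw [h, PySem.List.pyGetD_natCast]
  congr 2

lemma pyGetD_pySetD_ne (p : List Int) (i j v d : Int) (hi : 0 ≤ i) (hj : 0 ≤ j) (hne : j ≠ i) :
    PySem.List.pyGetD (PySem.List.pySetD p i v) j d = PySem.List.pyGetD p j d := by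
  rw [PySem.List.pySetD_of_nonneg _ _ hi, pyGetD_nonneg_eq_getD _ _ _ hj,
    pyGetD_nonneg_eq_getD _ _ _ hj]
  simp [List.getD, List.getElem?_set_ne (by omega : i.toNat ≠ j.toNat)]

lemma pyGetD_pySetD_self (p : List Int) (i v d : Int) (hi : 0 ≤ i) (hlen : i < (p.length : Int)) :
    PySem.List.pyGetD (PySem.List.pySetD p i v) i d = v := by
  rw [PySem.List.pySetD_of_nonneg _ _ hi, pyGetD_nonneg_eq_getD _ _ _ hi]
  simp [List.getD, (by omega : i.toNat < p.length)]

lemma pySetD_pySetD (p : List Int) (i v w : Int) (hi : 0 ≤ i) :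
    PySem.List.pySetD (PySem.List.pySetD p i v) i w = PySem.List.pySetD p i w := by
  rw [PySem.List.pySetD_of_nonneg _ _ hi, PySem.List.pySetD_of_nonneg _ _ hi,
    PySem.List.pySetD_of_nonneg _ _ hi, List.set_set]

lemma innerA (a p : List Int) (i : Int) (hi0 : 0 ≤ i) (hilen : i < (p.length : Int)) :
    ∀ (js : List Int) (v : Int), (∀ j ∈ js, 0 ≤ j ∧ j < i) →
    js.foldl (fun p' j =>
        if PySem.List.pyGetD p' i 0 >
            PySem.List.pyGetD p' j 0 +
              (200 - (PySem.List.pyGetD a i 0 - PySem.List.pyGetD a j 0)) ^ 2 then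
          PySem.List.pySetD p' i
            (PySem.List.pyGetD p' j 0 +
              (200 - (PySem.List.pyGetD a i 0 - PySem.List.pyGetD a j 0)) ^ 2)
        else p') (PySem.List.pySetD p i v)
    = PySem.List.pySetD p i (js.foldl (fun mv j =>
        min mv (PySem.List.pyGetD p j 0 +
          (200 - (PySem.List.pyGetD a i 0 - PySem.List.pyGetD a j 0)) ^ 2)) v) := by
  intro js
  induction js with
  | nil => intro v _; rfl
  | cons j js ih =>
    intro v hmem
    obtain ⟨hj0, hji⟩ := hmem j List.mem_cons_self
    simp only [List.foldl_cons]
    rw [pyGetD_pySetD_self p i v 0 hi0 hilen, pyGetD_pySetD_ne p i j v 0 hi0 hj0 (by omega)]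
    by_cases hc : v > PySem.List.pyGetD p j 0 +
        (200 - (PySem.List.pyGetD a i 0 - PySem.List.pyGetD a j 0)) ^ 2
    · rw [if_pos hc, pySetD_pySetD p i v _ hi0,
        ih _ (fun j' hj' => hmem j' (List.mem_cons_of_mem _ hj')),
        min_eq_right (le_of_lt hc)]
    · rw [if_neg hc, ih _ (fun j' hj' => hmem j' (List.mem_cons_of_mem _ hj')),
        min_eq_left (by omega)]

-- The two ports as explicit folds (definitional repackaging used only by the proofs).
def fA (a : List Int) : List Int → Int → List Int :=
  fun p i =>
    let p := PySem.List.pySetD p i ((200 - PySem.List.pyGetD a i 0) ^ 2)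
    (PySem.List.pyRange 1 i 1).foldl (fun p j =>
      if PySem.List.pyGetD p i 0 >
          PySem.List.pyGetD p j 0 +
            (200 - (PySem.List.pyGetD a i 0 - PySem.List.pyGetD a j 0)) ^ 2 then
        PySem.List.pySetD p i
          (PySem.List.pyGetD p j 0 +
            (200 - (PySem.List.pyGetD a i 0 - PySem.List.pyGetD a j 0)) ^ 2)
      else p) p

def fB (a : List Int) : (LCT × Int) → Int → (LCT × Int) :=
  fun st i =>
    let x := PySem.List.pyGetD a i 0
    let pi := (lctQuery pvLO pvHI x st.1).getD 0 + x * x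
    (lctInsert pvLO pvHI (-2 * (x + 200), pi + (x + 200) ^ 2) st.1, pi)

def pInit (a : List Int) : List Int := PySem.List.pySetD (List.replicate a.length 0) 0 0

def sInit : LCT × Int := (lctInsert pvLO pvHI (-400, 40000) .empty, 0)

lemma solution_eq_fold (a : List Int) :
    solution a = PySem.List.pyGetD
      ((PySem.List.pyRange 1 (a.length : Int) 1).foldl (fA a) (pInit a))
      ((a.length : Int) - 1) 0 := rfl

lemma solution_alt_eq_fold (a : List Int) :
    solution_alt a = ((PySem.List.pyRange 1 (a.length : Int) 1).foldl (fB a) sInit).2 := rfl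

lemma candMin_append (x : Int) (l : List (Int × Int)) (q : Int × Int) :
    candMin x (l ++ [q]) = min (candMin x l) (q.2 + (200 - (x - q.1)) ^ 2) := by
  simp [candMin, List.foldl_append]

lemma min_shift (A B c L : Int) (h : L = B - c) : min L (A - c) = min A B - c := by omega

lemma bounds_of_dom (a : List Int) (hd : Dom_solution a) : ∀ y ∈ a, pvLO ≤ y ∧ y ≤ pvHI := by
  intro y hy
  unfold Dom_solution at hd
  rw [List.all_eq_true] at hd
  have h := hd y hy
  simp only [pvDomInt, decide_eq_true_eq] at h
  unfold pvLO pvHI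
  omega

lemma main_inv (a : List Int) (hb : ∀ y ∈ a, pvLO ≤ y ∧ y ≤ pvHI) (hlen1 : 1 ≤ a.length) :
    ∀ (k : Nat) (m : Int), m = 1 + (k : Int) → m ≤ (a.length : Int) →
    ((PySem.List.pyRange 1 m 1).foldl (fA a) (pInit a)).length = a.length ∧
    ((PySem.List.pyRange 1 m 1).foldl (fB a) sInit).2 =
      PySem.List.pyGetD ((PySem.List.pyRange 1 m 1).foldl (fA a) (pInit a)) (m - 1) 0 ∧
    (∀ x : Int, pvLO ≤ x → x ≤ pvHI →
      lctQuery pvLO pvHI x ((PySem.List.pyRange 1 m 1).foldl (fB a) sInit).1 =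
        some (candMin x ((PySem.List.pyRange 1 m 1).map (fun j =>
          (PySem.List.pyGetD a j 0,
           PySem.List.pyGetD ((PySem.List.pyRange 1 m 1).foldl (fA a) (pInit a)) j 0))) - x * x)) := by
  intro k
  induction k with
  | zero =>
    intro m hm _
    have hm1 : m = 1 := by omega
    subst hm1
    rw [PySem.List.pyRange_one_eq_nil (le_refl 1)]
    simp only [List.foldl_nil, List.map_nil]
    refine ⟨?_, ?_, ?_⟩
    · simp [pInit, PySem.List.length_pySetD]
    · rw [show (1:Int) - 1 = 0 by ring]
      unfold pInit
      rw [pyGetD_pySetD_self _ _ _ _ (le_refl 0) (by simp; omega)]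
      rfl
    · intro x hx1 hx2
      show lctQuery pvLO pvHI x sInit.1 = _
      unfold sInit
      rw [lct_insert_query LCT.empty pvLO pvHI x (-400, 40000) hx1 hx2]
      show some (qmin none ((-400) * x + 40000)) = _
      unfold qmin candMin
      simp only [List.foldl_nil]
      congr 1
      ring
  | succ k ih =>
    intro m hm hmle
    set mp : Int := 1 + (k : Int) with hmp
    have hm' : m = mp + 1 := by push_cast at hm; omega
    obtain ⟨ihlen, ihsnd, ihq⟩ := ih mp rfl (by omega)
    have hrange : PySem.List.pyRange 1 m 1 = PySem.List.pyRange 1 mp 1 ++ [mp] := by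
      rw [hm']; exact PySem.List.pyRange_one_succ_right (by omega)
    rw [hrange]
    simp only [List.foldl_append, List.foldl_cons, List.foldl_nil, List.map_append,
      List.map_cons, List.map_nil]
    have hmp1 : (1:Int) ≤ mp := by omega
    have hmpl : mp < (a.length : Int) := by omega
    have hxmem : PySem.List.pyGetD a mp 0 ∈ a :=
      PySem.List.pyGetD_mem a 0 (by unfold PySem.Raise.InRange; omega)
    obtain ⟨hxlo, hxhi⟩ := hb _ hxmem
    have hfa : fA a ((PySem.List.pyRange 1 mp 1).foldl (fA a) (pInit a)) mp =
        PySem.List.pySetD ((PySem.List.pyRange 1 mp 1).foldl (fA a) (pInit a)) mp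
          (candMin (PySem.List.pyGetD a mp 0) ((PySem.List.pyRange 1 mp 1).map (fun j =>
            (PySem.List.pyGetD a j 0,
             PySem.List.pyGetD ((PySem.List.pyRange 1 mp 1).foldl (fA a) (pInit a)) j 0)))) := by
      simp only [fA]
      rw [innerA a _ mp (by omega) (by rw [ihlen]; omega) _ _
        (fun j hj => by rw [PySem.List.mem_pyRange_one] at hj; omega)]
      congr 1
      unfold candMin
      rw [List.foldl_map]
    have hc_at : PySem.List.pyGetD (fA a ((PySem.List.pyRange 1 mp 1).foldl (fA a) (pInit a)) mp) mp 0 =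
        candMin (PySem.List.pyGetD a mp 0) ((PySem.List.pyRange 1 mp 1).map (fun j =>
          (PySem.List.pyGetD a j 0,
           PySem.List.pyGetD ((PySem.List.pyRange 1 mp 1).foldl (fA a) (pInit a)) j 0))) := by
      rw [hfa, pyGetD_pySetD_self _ _ _ _ (by omega) (by rw [ihlen]; omega)]
    have hfb : fB a ((PySem.List.pyRange 1 mp 1).foldl (fB a) sInit) mp =
        (lctInsert pvLO pvHI
            (-2 * (PySem.List.pyGetD a mp 0 + 200),
              candMin (PySem.List.pyGetD a mp 0) ((PySem.List.pyRange 1 mp 1).map (fun j =>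
                (PySem.List.pyGetD a j 0,
                 PySem.List.pyGetD ((PySem.List.pyRange 1 mp 1).foldl (fA a) (pInit a)) j 0)))
                + (PySem.List.pyGetD a mp 0 + 200) ^ 2)
            ((PySem.List.pyRange 1 mp 1).foldl (fB a) sInit).1,
         candMin (PySem.List.pyGetD a mp 0) ((PySem.List.pyRange 1 mp 1).map (fun j =>
           (PySem.List.pyGetD a j 0,
            PySem.List.pyGetD ((PySem.List.pyRange 1 mp 1).foldl (fA a) (pInit a)) j 0)))) := by
      simp only [fB]
      rw [ihq _ hxlo hxhi]
      simp only [Option.getD_some]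
      rw [sub_add_cancel]
    refine ⟨?_, ?_, ?_⟩
    · rw [hfa, PySem.List.length_pySetD, ihlen]
    · rw [hfb, hfa, show m - 1 = mp by omega,
        pyGetD_pySetD_self _ _ _ _ (by omega) (by rw [ihlen]; omega)]
    · intro x hx1 hx2
      rw [hfb, hfa]
      show lctQuery pvLO pvHI x (lctInsert pvLO pvHI _ _) = _
      rw [lct_insert_query _ pvLO pvHI x _ hx1 hx2, ihq _ hx1 hx2]
      have hmapeq : (PySem.List.pyRange 1 mp 1).map (fun j =>
          (PySem.List.pyGetD a j 0,
           PySem.List.pyGetD (PySem.List.pySetD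
             ((PySem.List.pyRange 1 mp 1).foldl (fA a) (pInit a)) mp
             (candMin (PySem.List.pyGetD a mp 0) ((PySem.List.pyRange 1 mp 1).map (fun j =>
               (PySem.List.pyGetD a j 0,
                PySem.List.pyGetD ((PySem.List.pyRange 1 mp 1).foldl (fA a) (pInit a)) j 0))))) j 0))
          = (PySem.List.pyRange 1 mp 1).map (fun j =>
          (PySem.List.pyGetD a j 0,
           PySem.List.pyGetD ((PySem.List.pyRange 1 mp 1).foldl (fA a) (pInit a)) j 0)) := by
        apply List.map_congr_left
        intro j hj
        rw [PySem.List.mem_pyRange_one] at hj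
        rw [pyGetD_pySetD_ne _ _ _ _ _ (by omega) (by omega) (by omega)]
      rw [hmapeq, pyGetD_pySetD_self _ _ _ _ (by omega) (by rw [ihlen]; omega),
        candMin_append]
      show some (qmin _ _) = _
      unfold qmin
      congr 1
      apply min_shift
      ring
    
-- ===== VERDICT (by name: the statement is the Claim_ definition above) =====
theorem solution_spec : Claim_equal_solution := by
  intro a hdom hpre
  unfold Spec_solution
  have hlen1 : 1 ≤ a.length := List.length_pos_iff.mpr hpre
  obtain ⟨hl, hsnd, _⟩ := main_inv a (bounds_of_dom a hdom) hlen1 (a.length - 1)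
    (a.length : Int) (by omega) (le_refl _)
  rw [solution_eq_fold, solution_alt_eq_fold, hsnd]
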